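-- pv_equiv track=rewrite | github.com/zhangshiyunwlq/WLQ_LJC | DQN_HIGA1/modular_scheme_gener.py | check_perfect_grouping
-- ===== SOURCE A (Python) =====
-- def check_perfect_grouping(numbers: list, targets: list) -> bool:
--     """
--     检查一个数列是否能够完美按照目标和进行分组
--
--     参数：
--     numbers: 需要检查的数字列表
--     targets: 目标和列表
--
--     返回：
--     bool: 是否可以完美分组
--     """
--     if sum(numbers) != sum(targets):  # 首先检查总和是否相等
--         return False
--
--     current_sum = 0
--     target_index = 0
--     number_index = 0
--
--     while number_index < len(numbers) and target_index < len(targets):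
--         current_sum += numbers[number_index]
--
--         if abs(current_sum - targets[target_index]) < 0.1:  # 达到目标和
--             current_sum = 0
--             target_index += 1
--         elif current_sum > targets[target_index]:  # 超过目标和
--             return False
--
--         number_index += 1
--
--     return target_index == len(targets)  # 检查是否所有目标和都已匹配
-- ===== SOURCE B (Python) =====
-- def check_perfect_grouping(numbers: list, targets: list) -> bool:
--     if sum(numbers) != sum(targets):
--         return False
--     # staged passes: prefix sums of numbers, cumulative sums of targets
--     prefix = []
--     s = 0
--     for x in numbers:
--         s += x
--         prefix.append(s)
--     cum = []
--     s = 0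
--     for t in targets:
--         s += t
--         cum.append(s)
--     # merge-scan: each cumulative target must be hit exactly by the first
--     # prefix sum (strictly after the previous hit) that reaches it
--     i = 0
--     for c in cum:
--         while i < len(prefix) and prefix[i] < c:
--             i += 1
--         if i == len(prefix) or prefix[i] != c:
--             return False
--         i += 1
--     return True
-- ===== Notes on version B (the rewrite author's own statement) =====
-- stated objective: alternative
-- what changed: Replaces A's single greedy while-loop with a running per-group sum by staged passes: B precomputes the prefix-sum array of numbers and the cumulative-sum array of targets, then merge-scans them, requiring each cumulative target to be hit exactly by the first prefix sum that reaches it; there is no running group sum, no reset, no per-step group accumulation.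
import Mathlib
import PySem

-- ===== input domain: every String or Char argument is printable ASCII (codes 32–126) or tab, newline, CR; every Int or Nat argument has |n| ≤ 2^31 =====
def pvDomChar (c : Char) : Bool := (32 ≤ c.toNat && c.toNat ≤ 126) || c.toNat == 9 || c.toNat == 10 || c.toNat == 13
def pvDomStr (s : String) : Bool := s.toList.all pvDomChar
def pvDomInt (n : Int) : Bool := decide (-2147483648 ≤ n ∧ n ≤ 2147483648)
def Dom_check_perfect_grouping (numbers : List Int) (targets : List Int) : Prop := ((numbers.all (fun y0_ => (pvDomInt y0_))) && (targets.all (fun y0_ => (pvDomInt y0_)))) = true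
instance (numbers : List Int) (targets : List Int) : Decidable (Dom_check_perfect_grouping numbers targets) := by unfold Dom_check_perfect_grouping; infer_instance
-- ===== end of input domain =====

-- B replaces A's greedy while-loop with a running group sum by staged passes:
-- prefix sums of numbers and cumulative sums of targets, then a merge-scan of the two.

-- ===== PORT A =====
-- A's while loop; indices are always in range when read (loop guard), so getD is exact.
-- abs(current_sum - target) < 0.1 on integers is exactly equality.
def aLoop (numbers : List Int) (targets : List Int) (current_sum : Int) (ti ni : Nat) : Bool :=
  if h : ni < numbers.length ∧ ti < targets.length then
    let cs := current_sum + numbers.getD ni 0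
    if cs = targets.getD ti 0 then
      aLoop numbers targets 0 (ti + 1) (ni + 1)
    else if cs > targets.getD ti 0 then
      false
    else
      aLoop numbers targets cs ti (ni + 1)
  else
    decide (ti = targets.length)
termination_by numbers.length - ni
decreasing_by all_goals omega

def check_perfect_grouping (numbers : List Int) (targets : List Int) : Bool :=
  if numbers.sum ≠ targets.sum then false
  else aLoop numbers targets 0 0 0

-- ===== PORT B =====
-- the two accumulation passes of Source B (prefix sums / cumulative targets)
def prefixSums : List Int → Int → List Int
  | [], _ => []
  | x :: xs, s => (s + x) :: prefixSums xs (s + x)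

-- Source B's inner while-loop: first index ≥ i whose prefix sum reaches c (none = ran out)
def bScan (pfx : List Int) (c : Int) (i : Nat) : Option Nat :=
  if h : i < pfx.length then
    if pfx.getD i 0 < c then bScan pfx c (i + 1) else some i
  else none
termination_by pfx.length - i
decreasing_by omega

-- Source B's outer for-loop over the cumulative targets
def bOuter (pfx : List Int) (cum : List Int) (i : Nat) : Bool :=
  match cum with
  | [] => true
  | c :: rest =>
    match bScan pfx c i with
    | some j => if pfx.getD j 0 = c then bOuter pfx rest (j + 1) else false
    | none => false

def check_perfect_grouping_alt (numbers : List Int) (targets : List Int) : Bool :=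
  if numbers.sum ≠ targets.sum then false
  else bOuter (prefixSums numbers 0) (prefixSums targets 0) 0

-- ===== PRECONDITION & SPEC =====
def Spec_check_perfect_grouping (numbers : List Int) (targets : List Int) (out : Bool) : Prop := out = check_perfect_grouping_alt numbers targets
instance (numbers : List Int) (targets : List Int) (out : Bool) : Decidable (Spec_check_perfect_grouping numbers targets out) := by unfold Spec_check_perfect_grouping; infer_instance

-- ===== CLAIM (what is proved, stated in full; the proofs are below) =====
def Claim_equal_check_perfect_grouping : Prop := ∀ (numbers : List Int) (targets : List Int), Dom_check_perfect_grouping numbers targets → Spec_check_perfect_grouping numbers targets (check_perfect_grouping numbers targets)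

-- ===== LEMMAS AND PROOFS =====

theorem prefixSums_length (xs : List Int) (s : Int) : (prefixSums xs s).length = xs.length := by
  induction xs generalizing s with
  | nil => simp [prefixSums]
  | cons x xs ih => simp [prefixSums, ih]

theorem prefixSums_getD (xs : List Int) (s : Int) (i : Nat) (h : i < xs.length) :
    (prefixSums xs s).getD i 0 = s + (xs.take (i + 1)).sum := by
  induction xs generalizing s i with
  | nil => simp at h
  | cons x xs ih =>
    cases i with
    | zero => simp [prefixSums]
    | succ n =>
      simp only [prefixSums, List.getD_cons_succ, List.take_succ_cons, List.sum_cons]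
      rw [ih (s + x) n (by simpa using h)]
      ring

theorem take_sum_succ (xs : List Int) (i : Nat) (h : i < xs.length) :
    (xs.take (i + 1)).sum = (xs.take i).sum + xs[i] := by
  induction xs generalizing i with
  | nil => simp at h
  | cons x xs ih =>
    cases i with
    | zero => simp
    | succ n =>
      simp only [List.take_succ_cons, List.sum_cons, List.getElem_cons_succ]
      rw [ih n (by simpa using h)]
      ring

-- numbers exhausted: A returns (ti = len targets), B's scan finds nothing
theorem aLoop_eq_b_exhausted (numbers targets : List Int) (cs : Int) (ti : Nat)
    (hti : ti ≤ targets.length) :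
    aLoop numbers targets cs ti numbers.length =
      bOuter (prefixSums numbers 0) ((prefixSums targets 0).drop ti) numbers.length := by
  rw [aLoop]
  have hcond : ¬ (numbers.length < numbers.length ∧ ti < targets.length) := by omega
  rw [dif_neg hcond]
  rcases Nat.lt_or_ge ti targets.length with hlt | hge
  · have hlt' : ti < (prefixSums targets 0).length := by rw [prefixSums_length]; exact hlt
    rw [List.drop_eq_getElem_cons hlt', bOuter, bScan]
    rw [dif_neg (by rw [prefixSums_length]; omega)]
    simp; omega
  · have hte : ti = targets.length := by omega
    subst hte
    have hd : (prefixSums targets 0).drop targets.length = [] := by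
      apply List.drop_of_length_le; rw [prefixSums_length]
    rw [hd]
    simp [bOuter]

theorem aLoop_eq_b (k : Nat) (numbers targets : List Int) (cs : Int) (ti ni : Nat)
    (hk : numbers.length - ni ≤ k) (hti : ti ≤ targets.length) (hni : ni ≤ numbers.length)
    (hcs : cs = (numbers.take ni).sum - (targets.take ti).sum) :
    aLoop numbers targets cs ti ni =
      bOuter (prefixSums numbers 0) ((prefixSums targets 0).drop ti) ni := by
  induction k generalizing cs ti ni with
  | zero =>
    have : ni = numbers.length := by omega
    subst this; exact aLoop_eq_b_exhausted numbers targets cs ti hti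
  | succ k ih =>
    by_cases hniL : ni < numbers.length
    · rcases Nat.lt_or_ge ti targets.length with hlt | hge
      · -- both a number and a target remain
        have hlt' : ti < (prefixSums targets 0).length := by rw [prefixSums_length]; exact hlt
        have hniP : ni < (prefixSums numbers 0).length := by rw [prefixSums_length]; exact hniL
        have hv : (prefixSums numbers 0).getD ni 0 = (numbers.take (ni + 1)).sum := by
          rw [prefixSums_getD numbers 0 ni hniL]; ring
        have hcumget : (prefixSums targets 0)[ti] = (targets.take (ti + 1)).sum := by
          have := prefixSums_getD targets 0 ti hlt
          rwa [List.getD_eq_getElem _ _ hlt', zero_add] at this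
        have htg : targets.getD ti 0 = targets[ti] := by
          simp [List.getD, List.getElem?_eq_getElem hlt]
        have hng : numbers.getD ni 0 = numbers[ni] := by
          simp [List.getD, List.getElem?_eq_getElem hniL]
        have hPsucc := take_sum_succ numbers ni hniL
        have hTsucc := take_sum_succ targets ti hlt
        have key : (prefixSums numbers 0).getD ni 0 - (prefixSums targets 0)[ti]
            = (cs + numbers.getD ni 0) - targets.getD ti 0 := by
          rw [hv, hcumget, hPsucc, hTsucc, htg, hng, hcs]; ring
        rw [aLoop, dif_pos ⟨hniL, hlt⟩, List.drop_eq_getElem_cons hlt', bOuter]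
        by_cases h1 : cs + numbers.getD ni 0 = targets.getD ti 0
        · -- matched: both consume the number and move to the next target
          have hvc : (prefixSums numbers 0).getD ni 0 = (prefixSums targets 0)[ti] := by omega
          have hnl : ¬ ((prefixSums numbers 0).getD ni 0 < (prefixSums targets 0)[ti]) := by omega
          have hscan : bScan (prefixSums numbers 0) ((prefixSums targets 0)[ti]) ni = some ni := by
            rw [bScan, dif_pos hniP, if_neg hnl]
          rw [if_pos h1, hscan]
          show aLoop numbers targets 0 (ti + 1) (ni + 1) =
            if (prefixSums numbers 0).getD ni 0 = (prefixSums targets 0)[ti] then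
              bOuter (prefixSums numbers 0) ((prefixSums targets 0).drop (ti + 1)) (ni + 1)
            else false
          rw [if_pos hvc]
          have hsum : (numbers.take (ni + 1)).sum = (targets.take (ti + 1)).sum := by
            rw [← hv, ← hcumget]; omega
          refine ih 0 (ti + 1) (ni + 1) (by omega) (by omega) (by omega) (by omega)
        · by_cases h2 : cs + numbers.getD ni 0 > targets.getD ti 0
          · -- overshoot: both return false
            have hnl : ¬ ((prefixSums numbers 0).getD ni 0 < (prefixSums targets 0)[ti]) := by omega
            have hscan : bScan (prefixSums numbers 0) ((prefixSums targets 0)[ti]) ni = some ni := by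
              rw [bScan, dif_pos hniP, if_neg hnl]
            rw [if_neg h1, if_pos h2, hscan]
            show false = if (prefixSums numbers 0).getD ni 0 = (prefixSums targets 0)[ti] then
              bOuter (prefixSums numbers 0) ((prefixSums targets 0).drop (ti + 1)) (ni + 1)
            else false
            rw [if_neg (by omega)]
          · -- still below: A keeps accumulating, B's scan advances
            have hl3 : (prefixSums numbers 0).getD ni 0 < (prefixSums targets 0)[ti] := by omega
            have hstep : bScan (prefixSums numbers 0) ((prefixSums targets 0)[ti]) ni
                = bScan (prefixSums numbers 0) ((prefixSums targets 0)[ti]) (ni + 1) := by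
              conv_lhs => rw [bScan]
              rw [dif_pos hniP, if_pos hl3]
            rw [if_neg h1, if_neg h2, hstep]
            have hIH := ih (cs + numbers.getD ni 0) ti (ni + 1) (by omega) hti (by omega) (by omega)
            rw [hIH, List.drop_eq_getElem_cons hlt', bOuter]
      · -- all targets matched, numbers may remain: both return true
        have hte : ti = targets.length := by omega
        subst hte
        have hdrop : (prefixSums targets 0).drop targets.length = [] := by
          apply List.drop_of_length_le; rw [prefixSums_length]
        rw [aLoop, dif_neg (by omega), hdrop]
        simp [bOuter]
    · have : ni = numbers.length := by omega
      subst this; exact aLoop_eq_b_exhausted numbers targets cs ti hti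

-- ===== VERDICT (by name: the statement is the Claim_ definition above) =====
theorem check_perfect_grouping_spec : Claim_equal_check_perfect_grouping := by
  intro numbers targets _
  unfold Spec_check_perfect_grouping check_perfect_grouping check_perfect_grouping_alt
  by_cases h : numbers.sum ≠ targets.sum
  · simp [h]
  · simp only [h, if_neg, not_false_iff]
    rw [aLoop_eq_b (numbers.length) numbers targets 0 0 0 (by omega) (by omega) (by omega) (by simp)]
    rfl
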